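-- pv_equiv track=rewrite | github.com/myungwooko/algorithm | _pramp/200408/diff_between_two_strings.py | diffBetweenTwoStrings
-- ===== SOURCE A (Python) =====
-- def diffBetweenTwoStrings(source, target):
--     def helper(i, j):
--         path = []
--         if i == len(source):
--             while j < len(target):
--                 path.append("+" + target[j])
--                 j += 1
--             return path
--         elif j == len(target):
--             while i < len(source):
--                 path.append("-" + source[i])
--                 i += 1
--             return path
--
--         if source[i] == target[j]:
--             path = [source[i]] + helper(i + 1, j + 1)
--         else:
--             deleteCase = ["-" + source[i]] + helper(i + 1, j)
--             addCase = ["+" + target[j]] + helper(i, j + 1)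
--             # If there are multiple answers, use the answer that favors removing from the source first.
--             path = deleteCase if len(deleteCase) <= len(addCase) else addCase
--         return path
--
--     return helper(0, 0)
-- ===== SOURCE B (Python) =====
-- def diffBetweenTwoStrings(source, target):
--     m, n = len(source), len(target)
--     # dp rows, bottom-up: rows[i][j] = length of shortest diff script
--     # between source[i:] and target[j:]
--     rows = [[n - j for j in range(n + 1)]]
--     for i in range(m - 1, -1, -1):
--         below = rows[0]
--         new = [0] * (n + 1)
--         new[n] = below[n] + 1
--         for j in range(n - 1, -1, -1):
--             if source[i] == target[j]:
--                 new[j] = below[j + 1]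
--             else:
--                 new[j] = 1 + min(below[j], new[j + 1])
--         rows.insert(0, new)
--     path = []
--     i = j = 0
--     while True:
--         if i == m:
--             path.extend("+" + c for c in target[j:])
--             return path
--         if j == n:
--             path.extend("-" + c for c in source[i:])
--             return path
--         if source[i] == target[j]:
--             path.append(source[i]); i += 1; j += 1
--         elif rows[i + 1][j] <= rows[i][j + 1]:
--             path.append("-" + source[i]); i += 1
--         else:
--             path.append("+" + target[j]); j += 1
-- ===== Notes on version B (the rewrite author's own statement) =====
-- stated objective: faster
-- what changed: Replaced A's branch-both-ways recursion (it fully computes both the delete and the add script at every mismatch) by a bottom-up edit-distance DP table followed by a single reconstruction walk that consults the table, keeping the delete-on-tie preference; intended as faster (O(m*n) vs exponential) - a timing run saw A time out at n=16 where B returned, so no ratio could be measured.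
import Mathlib
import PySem

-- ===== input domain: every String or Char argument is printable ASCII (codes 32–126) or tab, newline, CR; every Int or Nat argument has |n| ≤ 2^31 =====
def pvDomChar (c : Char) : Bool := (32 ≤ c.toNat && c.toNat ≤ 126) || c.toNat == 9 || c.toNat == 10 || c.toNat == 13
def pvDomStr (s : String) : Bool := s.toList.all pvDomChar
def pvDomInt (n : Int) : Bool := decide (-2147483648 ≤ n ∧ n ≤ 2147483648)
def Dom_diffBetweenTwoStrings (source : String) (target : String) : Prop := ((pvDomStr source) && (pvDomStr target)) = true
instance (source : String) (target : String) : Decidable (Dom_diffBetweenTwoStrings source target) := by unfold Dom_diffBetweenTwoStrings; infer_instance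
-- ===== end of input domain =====

-- B replaces A's branch-both-ways recursion by an edit-distance DP table (built
-- bottom-up) followed by a single reconstruction walk with the same delete-on-tie
-- preference; intended as faster (a timing run measured A timing out at n=16
-- where B returned, so no ratio could be taken).

-- ===== PORT A =====
-- "+" + c  /  "-" + c
def pvPlus (c : Char) : String := String.ofList ['+', c]
def pvMinus (c : Char) : String := String.ofList ['-', c]

-- helper(i, j) of A.  Python tests 'i == len(source)'; on every reachable call i ≤ len
-- holds, so 'len ≤ i' is the same test and makes the measure decrease for all Nat i, j.
-- source[i] (guarded in range) is ported as getD; the two while-append loops are the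
-- maps over the remaining suffixes, exactly the elements Python appends.
def pvHelperA (s t : List Char) (i j : Nat) : List String :=
  if s.length ≤ i then (t.drop j).map pvPlus
  else if t.length ≤ j then (s.drop i).map pvMinus
  else
    let a := s.getD i ' '
    let b := t.getD j ' '
    if a = b then String.ofList [a] :: pvHelperA s t (i + 1) (j + 1)
    else
      let deleteCase := pvMinus a :: pvHelperA s t (i + 1) j
      let addCase := pvPlus b :: pvHelperA s t i (j + 1)
      if deleteCase.length ≤ addCase.length then deleteCase else addCase
termination_by (s.length - i) + (t.length - j)
decreasing_by all_goals omega

def diffBetweenTwoStrings (source : String) (target : String) : List String :=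
  pvHelperA source.toList target.toList 0 0

-- ===== PORT B =====
-- inner j-loop of Source B: given the row 'below' for source suffix s (shifted so that its
-- head is below[j]), produce the row for a :: s over the target suffix t; the base case
-- is Source B's 'new[n] = below[n] + 1', the cons case computes new[j] from new[j+1],
-- below[j], below[j+1] right-to-left exactly as the descending Python loop does.
def pvNextRow (a : Char) : List Char → List Nat → List Nat
  | [], below => [below.getD 0 0 + 1]
  | b :: t, below =>
      let rest := pvNextRow a t below.tail
      (if a = b then below.getD 1 0 else 1 + min (below.getD 0 0) (rest.getD 0 0)) :: rest

-- the i-loop of Source B: starts from the base row [n, n-1, …, 0] and prepends one new row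
-- per source character, last character first (rows.insert(0, new)).
def pvBuildRows : List Char → List Char → List (List Nat)
  | [], t => [(List.range (t.length + 1)).map (fun j => t.length - j)]
  | a :: s, t =>
      let rows := pvBuildRows s t
      pvNextRow a t (rows.getD 0 []) :: rows

-- the reconstruction while-loop of Source B; i, j only index the dp table, the two list
-- arguments are the current suffixes source[i:], target[j:] (what the loop inspects).
def pvWalkB (rows : List (List Nat)) : Nat → Nat → List Char → List Char → List String
  | _, _, [], t => t.map pvPlus
  | _, _, a :: s, [] => (a :: s).map pvMinus
  | i, j, a :: s, b :: t =>
      if a = b then String.ofList [a] :: pvWalkB rows (i + 1) (j + 1) s t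
      else if (rows.getD (i + 1) []).getD j 0 ≤ (rows.getD i []).getD (j + 1) 0 then
        pvMinus a :: pvWalkB rows (i + 1) j s (b :: t)
      else
        pvPlus b :: pvWalkB rows i (j + 1) (a :: s) t
termination_by _ _ s t => s.length + t.length
decreasing_by all_goals (simp; try omega)

def diffBetweenTwoStrings_alt (source : String) (target : String) : List String :=
  pvWalkB (pvBuildRows source.toList target.toList) 0 0 source.toList target.toList

-- ===== PRECONDITION & SPEC =====
def Spec_diffBetweenTwoStrings (source : String) (target : String) (out : List String) : Prop := out = diffBetweenTwoStrings_alt source target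
instance (source : String) (target : String) (out : List String) : Decidable (Spec_diffBetweenTwoStrings source target out) := by unfold Spec_diffBetweenTwoStrings; infer_instance

-- ===== CLAIM (what is proved, stated in full; the proofs are below) =====
def Claim_equal_diffBetweenTwoStrings : Prop := ∀ (source : String) (target : String), Dom_diffBetweenTwoStrings source target → Spec_diffBetweenTwoStrings source target (diffBetweenTwoStrings source target)

-- ===== LEMMAS AND PROOFS =====

-- pvCost s t: number of +/- operations in a shortest diff script between s and t
-- (the value the dp table of B stores); pvLen s t: total length of A's helper result
-- (kept characters count too).  They are linked by 2*pvLen = |s| + |t| + pvCost.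
def pvCost : List Char → List Char → Nat
  | [], t => t.length
  | a :: s, [] => (a :: s).length
  | a :: s, b :: t => if a = b then pvCost s t else 1 + min (pvCost s (b :: t)) (pvCost (a :: s) t)

def pvLen : List Char → List Char → Nat
  | [], t => t.length
  | a :: s, [] => (a :: s).length
  | a :: s, b :: t =>
      if a = b then 1 + pvLen s t else 1 + min (pvLen s (b :: t)) (pvLen (a :: s) t)
termination_by s t => s.length + t.length
decreasing_by all_goals (simp; try omega)

theorem pvCost_nil_left (t : List Char) : pvCost [] t = t.length := by simp [pvCost]

theorem pvCost_nil_right (s : List Char) : pvCost s [] = s.length := by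
  cases s <;> simp [pvCost]

theorem pvLen_nil_right (s : List Char) : pvLen s [] = s.length := by
  cases s <;> simp [pvLen]

theorem pvLen_two : ∀ (s t : List Char), 2 * pvLen s t = s.length + t.length + pvCost s t := by
  intro s t
  fun_induction pvLen s t with
  | case1 t => simp only [pvCost_nil_left, List.length_nil]; omega
  | case2 a s => simp only [pvCost_nil_right, List.length_cons, List.length_nil]; omega
  | case3 s b t ih =>
    simp [pvCost]
    omega
  | case4 a s b t hab ih1 ih2 =>
    simp only [pvCost, if_neg hab, List.length_cons]
    simp only [List.length_cons] at ih1 ih2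
    omega

theorem pvGetD_tail (l : List Nat) (j : Nat) (d : Nat) : l.tail.getD j d = l.getD (j + 1) d := by
  cases l <;> simp

theorem pvDrop_cons_getD (l : List Char) (i : Nat) (h : i < l.length) :
    l.drop i = l.getD i ' ' :: l.drop (i + 1) := by
  rw [List.getD_eq_getElem _ _ h]
  exact List.drop_eq_getElem_cons h

theorem pvHelperA_length (s t : List Char) (i j : Nat) (hi : i ≤ s.length) (hj : j ≤ t.length) :
    (pvHelperA s t i j).length = pvLen (s.drop i) (t.drop j) := by
  revert hi hj
  fun_induction pvHelperA s t i j with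
  | case1 i j h =>
    intro hi hj
    simp [List.drop_eq_nil_of_le h, pvLen]
  | case2 i j h1 h2 =>
    intro hi hj
    simp [List.drop_eq_nil_of_le h2, pvLen_nil_right]
  | case3 i j h1 h2 a b hab ih =>
    intro hi hj
    have hab' : s.getD i ' ' = t.getD j ' ' := hab
    rw [pvDrop_cons_getD s i (by omega), pvDrop_cons_getD t j (by omega)]
    simp only [pvLen, List.length_cons, ih (by omega) (by omega)]
    rw [if_pos hab']
    omega
  | case4 i j h1 h2 a b hab dc ac hle ih1 ih2 =>
    intro hi hj
    have hab' : ¬ s.getD i ' ' = t.getD j ' ' := hab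
    have e1 := ih1 (by omega) hj
    have e2 := ih2 hi (by omega)
    replace hle : (pvMinus (s.getD i ' ') :: pvHelperA s t (i + 1) j).length ≤
        (pvPlus (t.getD j ' ') :: pvHelperA s t i (j + 1)).length := hle
    simp only [List.length_cons, e1, e2] at hle
    show (pvMinus (s.getD i ' ') :: pvHelperA s t (i + 1) j).length = _
    rw [pvDrop_cons_getD s i (by omega), pvDrop_cons_getD t j (by omega)]
    simp only [pvLen, List.length_cons, e1]
    rw [if_neg hab']
    rw [← pvDrop_cons_getD t j (by omega), ← pvDrop_cons_getD s i (by omega)]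
    omega
  | case5 i j h1 h2 a b hab dc ac hle ih1 ih2 =>
    intro hi hj
    have hab' : ¬ s.getD i ' ' = t.getD j ' ' := hab
    have e1 := ih1 (by omega) hj
    have e2 := ih2 hi (by omega)
    replace hle : ¬ (pvMinus (s.getD i ' ') :: pvHelperA s t (i + 1) j).length ≤
        (pvPlus (t.getD j ' ') :: pvHelperA s t i (j + 1)).length := hle
    simp only [List.length_cons, e1, e2] at hle
    show (pvPlus (t.getD j ' ') :: pvHelperA s t i (j + 1)).length = _
    rw [pvDrop_cons_getD s i (by omega), pvDrop_cons_getD t j (by omega)]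
    simp only [pvLen, List.length_cons, e2]
    rw [if_neg hab']
    rw [← pvDrop_cons_getD t j (by omega), ← pvDrop_cons_getD s i (by omega)]
    omega

theorem pvNextRow_spec (a : Char) (s : List Char) :
    ∀ (t : List Char) (below : List Nat),
      (∀ j, j ≤ t.length → below.getD j 0 = pvCost s (t.drop j)) →
      ∀ j, j ≤ t.length → (pvNextRow a t below).getD j 0 = pvCost (a :: s) (t.drop j) := by
  intro t
  induction t with
  | nil =>
    intro below hb j hj
    have hj0 : j = 0 := by simpa using hj
    subst hj0
    have h0 := hb 0 (by simp)
    simp only [List.drop_nil, pvCost_nil_right] at h0 ⊢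
    simp only [pvNextRow, List.getD_cons_zero, List.length_cons]
    omega
  | cons b t ih =>
    intro below hb j hj
    have htail : ∀ k, k ≤ t.length → below.tail.getD k 0 = pvCost s (t.drop k) := by
      intro k hk
      rw [pvGetD_tail]
      exact hb (k + 1) (by simp; omega)
    cases j with
    | zero =>
      have h0 := hb 0 (by simp)
      have h1 := hb 1 (by simp)
      have hr := ih below.tail htail 0 (by omega)
      simp only [List.drop_zero] at h0 ⊢
      simp only [List.drop_succ_cons, List.drop_zero] at h1 hr
      simp only [pvNextRow, List.getD_cons_zero, pvCost]
      split_ifs with hab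
      · exact h1
      · rw [h0, hr]
    | succ j' =>
      have := ih below.tail htail j' (by simpa using hj)
      simpa [pvNextRow]

theorem pvBuildRows_spec (s t : List Char) :
    ∀ (i j : Nat), i ≤ s.length → j ≤ t.length →
    ((pvBuildRows s t).getD i []).getD j 0 = pvCost (s.drop i) (t.drop j) := by
  induction s with
  | nil =>
    intro i j hi hj
    have hi0 : i = 0 := by simpa using hi
    subst hi0
    simp only [pvBuildRows, List.getD_cons_zero, List.drop_nil, pvCost]
    rw [List.getD_eq_getElem _ _ (by simp; omega)]
    simp [List.length_drop]
  | cons a s ih =>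
    intro i j hi hj
    cases i with
    | zero =>
      simp only [pvBuildRows, List.getD_cons_zero, List.drop_zero]
      exact pvNextRow_spec a s t ((pvBuildRows s t).getD 0 [])
        (fun k hk => by simpa using ih 0 k (by omega) hk) j hj
    | succ i' =>
      simpa [pvBuildRows] using ih i' j (by simpa using hi) hj

theorem pvHelperA_eq_walkB (s t : List Char) (i j : Nat) (hi : i ≤ s.length) (hj : j ≤ t.length) :
    pvHelperA s t i j = pvWalkB (pvBuildRows s t) i j (s.drop i) (t.drop j) := by
  revert hi hj
  fun_induction pvHelperA s t i j with
  | case1 i j h =>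
    intro hi hj
    rw [List.drop_eq_nil_of_le h]
    simp [pvWalkB]
  | case2 i j h1 h2 =>
    intro hi hj
    rw [List.drop_eq_nil_of_le h2, pvDrop_cons_getD s i (by omega)]
    simp [pvWalkB]
  | case3 i j h1 h2 a b hab ih =>
    intro hi hj
    have hab' : s.getD i ' ' = t.getD j ' ' := hab
    rw [pvDrop_cons_getD s i (by omega), pvDrop_cons_getD t j (by omega)]
    rw [pvWalkB]
    rw [if_pos hab']
    exact congrArg _ (ih (by omega) (by omega))
  | case4 i j h1 h2 a b hab dc ac hle ih1 ih2 =>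
    intro hi hj
    have hab' : ¬ s.getD i ' ' = t.getD j ' ' := hab
    replace hle : (pvMinus (s.getD i ' ') :: pvHelperA s t (i + 1) j).length ≤
        (pvPlus (t.getD j ' ') :: pvHelperA s t i (j + 1)).length := hle
    have hd1 := pvBuildRows_spec s t (i + 1) j (by omega) hj
    have hd2 := pvBuildRows_spec s t i (j + 1) (by omega) (by omega)
    have hl1 := pvHelperA_length s t (i + 1) j (by omega) hj
    have hl2 := pvHelperA_length s t i (j + 1) (by omega) (by omega)
    have b1 := pvLen_two (s.drop (i + 1)) (t.drop j)
    have b2 := pvLen_two (s.drop i) (t.drop (j + 1))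
    simp only [List.length_drop] at b1 b2
    simp only [List.length_cons, hl1, hl2] at hle
    show (pvMinus (s.getD i ' ') :: pvHelperA s t (i + 1) j) = _
    rw [pvDrop_cons_getD s i (by omega), pvDrop_cons_getD t j (by omega)]
    rw [pvWalkB]
    rw [if_neg hab', if_pos (by rw [hd1, hd2]; omega)]
    have := ih1 (by omega) hj
    rw [pvDrop_cons_getD t j (by omega)] at this
    exact congrArg _ this
  | case5 i j h1 h2 a b hab dc ac hle ih1 ih2 =>
    intro hi hj
    have hab' : ¬ s.getD i ' ' = t.getD j ' ' := hab
    replace hle : ¬ (pvMinus (s.getD i ' ') :: pvHelperA s t (i + 1) j).length ≤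
        (pvPlus (t.getD j ' ') :: pvHelperA s t i (j + 1)).length := hle
    have hd1 := pvBuildRows_spec s t (i + 1) j (by omega) hj
    have hd2 := pvBuildRows_spec s t i (j + 1) (by omega) (by omega)
    have hl1 := pvHelperA_length s t (i + 1) j (by omega) hj
    have hl2 := pvHelperA_length s t i (j + 1) (by omega) (by omega)
    have b1 := pvLen_two (s.drop (i + 1)) (t.drop j)
    have b2 := pvLen_two (s.drop i) (t.drop (j + 1))
    simp only [List.length_drop] at b1 b2
    simp only [List.length_cons, hl1, hl2] at hle
    show (pvPlus (t.getD j ' ') :: pvHelperA s t i (j + 1)) = _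
    rw [pvDrop_cons_getD s i (by omega), pvDrop_cons_getD t j (by omega)]
    rw [pvWalkB]
    rw [if_neg hab', if_neg (by rw [hd1, hd2]; omega)]
    have := ih2 hi (by omega)
    rw [pvDrop_cons_getD s i (by omega)] at this
    exact congrArg _ this

-- ===== VERDICT (by name: the statement is the Claim_ definition above) =====
theorem diffBetweenTwoStrings_spec : Claim_equal_diffBetweenTwoStrings := by
  intro source target _
  unfold Spec_diffBetweenTwoStrings diffBetweenTwoStrings diffBetweenTwoStrings_alt
  simpa using pvHelperA_eq_walkB source.toList target.toList 0 0 (by omega) (by omega)
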